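-- pv_equiv track=rewrite | github.com/HInteroo/PythonMiniProjects | Max.py | makeBinary
-- ===== SOURCE A (Python) =====
-- def makeBinary(n):
--     #precondition: n not negative
--     if n < 0:
--         raise ValueError('MakeBinary cannot take negative')
--     newList = [0]*8
--     q = n
--     for i in range(8):
--         # assign quotient and remainder to be  new q and r
--         q, r = q//2, q%2
--         newList[i] = r
--     return newList
-- ===== SOURCE B (Python) =====
-- def makeBinary(n):
--     if n < 0:
--         raise ValueError('MakeBinary cannot take negative')
--     return [int(c) for c in format(n % 256, '08b')[::-1]]
-- ===== Notes on version B (the rewrite author's own statement) =====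
-- stated objective: idiomatic
-- what changed: Replaces the running quotient/remainder loop that writes into a preallocated list with a single expression: format(n % 256, '08b') builds the MSB-first binary string, which is reversed and unpacked with int(c).
import Mathlib
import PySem

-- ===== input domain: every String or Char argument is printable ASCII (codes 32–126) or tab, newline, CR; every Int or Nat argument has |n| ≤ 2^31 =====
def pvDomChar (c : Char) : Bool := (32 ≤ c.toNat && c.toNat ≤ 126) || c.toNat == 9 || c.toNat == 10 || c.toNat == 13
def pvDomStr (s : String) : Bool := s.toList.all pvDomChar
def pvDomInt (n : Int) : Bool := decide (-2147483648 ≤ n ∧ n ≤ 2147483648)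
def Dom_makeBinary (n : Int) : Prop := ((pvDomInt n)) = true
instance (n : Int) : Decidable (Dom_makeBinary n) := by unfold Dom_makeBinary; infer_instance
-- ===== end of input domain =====

-- B replaces A's running quotient/remainder loop by formatting n % 256 as an 8-char
-- binary string and unpacking it in reverse (idiomatic; same return value on Pre_).

-- ===== PORT A =====
-- literal transliteration of A: newList = [0]*8; for i in range(8): q,r = q//2,q%2; newList[i]=r
def makeBinary (n : Int) : List Int :=
  let newList := List.replicate 8 (0 : Int)
  ((PySem.List.pyRange 0 8 1).foldl
    (fun (st : Int × List Int) i =>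
      let q := PySem.Int.floordiv st.1 2
      let r := PySem.Int.mod st.1 2
      (q, st.2.set i.toNat r)) (n, newList)).2

-- ===== PORT B =====
-- port of Python's format(m, '08b') for 0 ≤ m < 256: the 8 binary digits, MSB first
def pvFmt08b (m : Int) : List Char :=
  (List.range 8).map (fun i => if m / 2 ^ (7 - i) % 2 = 1 then '1' else '0')

-- [int(c) for c in format(n % 256, '08b')[::-1]]
def makeBinary_alt (n : Int) : List Int :=
  ((pvFmt08b (PySem.Int.mod n 256)).reverse).map (fun c => if c = '1' then (1 : Int) else 0)

-- ===== PRECONDITION & SPEC =====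
-- A raises ValueError on n < 0; exactly those inputs are excluded.
def Pre_makeBinary (n : Int) : Prop := 0 ≤ n
instance (n : Int) : Decidable (Pre_makeBinary n) := by unfold Pre_makeBinary; infer_instance
def pvWitness_makeBinary : Int := (5)

def Spec_makeBinary (n : Int) (out : List Int) : Prop := out = makeBinary_alt n
instance (n : Int) (out : List Int) : Decidable (Spec_makeBinary n out) := by unfold Spec_makeBinary; infer_instance

-- ===== CLAIM (what is proved, stated in full; the proofs are below) =====
def Claim_equal_makeBinary : Prop := ∀ (n : Int), Dom_makeBinary n → Pre_makeBinary n → Spec_makeBinary n (makeBinary n)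

-- ===== LEMMAS AND PROOFS =====

-- ===== VERDICT =====
theorem makeBinary_spec : Claim_equal_makeBinary := by
  intro n _ hpre
  unfold Spec_makeBinary makeBinary makeBinary_alt pvFmt08b
  have h8 : PySem.List.pyRange 0 8 1 = [0, 1, 2, 3, 4, 5, 6, 7] := by decide
  rw [h8]
  have hm : ∀ a : Int, PySem.Int.mod a 2 = a % 2 := fun a =>
    PySem.Int.mod_eq_emod_of_pos (by norm_num)
  have hm256 : PySem.Int.mod n 256 = n % 256 :=
    PySem.Int.mod_eq_emod_of_pos (by norm_num)
  have hd : ∀ a : Int, PySem.Int.floordiv a 2 = a / 2 := fun a =>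
    PySem.Int.floordiv_eq_ediv_of_pos (by norm_num)
  simp only [List.foldl, hm, hd, hm256,
    List.range_succ, List.range_zero, List.map_cons, List.map_nil,
    List.nil_append, List.cons_append, List.reverse_cons, List.reverse_nil]
  norm_num [List.set, apply_ite (fun c => if c = '1' then (1 : Int) else 0)]
  simp only [List.set, List.replicate, (by decide : Int.toNat 2 = 2), (by decide : Int.toNat 3 = 3), (by decide : Int.toNat 4 = 4), (by decide : Int.toNat 5 = 5), (by decide : Int.toNat 6 = 6), (by decide : Int.toNat 7 = 7),
    eq_false (by decide : ¬ (('0' : Char) = '1')), imp_false, List.cons.injEq, and_true]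
  refine ⟨?_, ?_, ?_, ?_, ?_, ?_, ?_, ?_⟩ <;> split_ifs <;> omega
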